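-- pv_equiv track=rewrite | github.com/ZeroMin-K/Algorithm-Study | 프로그래머스/Level 2/짝지어 제거하기-ex.py | solution
-- ===== SOURCE A (Python) =====
-- def solution(s):
--     answer = [""]
--
--     for alpha in s:
--         if answer[-1] == alpha:
--             answer.pop()
--         else:
--             answer.append(alpha)
--
--     return 1 if len(answer) == 1 else 0
-- ===== SOURCE B (Python) =====
-- def solution(s):
--     while True:
--         removed = False
--         for i in range(len(s) - 1):
--             if s[i] == s[i + 1]:
--                 s = s[:i] + s[i + 2:]
--                 removed = True
--                 break
--         if not removed:
--             break
--     return 1 if s == "" else 0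
-- ===== Notes on version B (the rewrite author's own statement) =====
-- stated objective: alternative
-- what changed: A reduces in one pass with a stack; B repeatedly scans the current string for the first adjacent equal pair, deletes it by slicing and restarts until no pair remains, then tests emptiness.
import Mathlib
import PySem

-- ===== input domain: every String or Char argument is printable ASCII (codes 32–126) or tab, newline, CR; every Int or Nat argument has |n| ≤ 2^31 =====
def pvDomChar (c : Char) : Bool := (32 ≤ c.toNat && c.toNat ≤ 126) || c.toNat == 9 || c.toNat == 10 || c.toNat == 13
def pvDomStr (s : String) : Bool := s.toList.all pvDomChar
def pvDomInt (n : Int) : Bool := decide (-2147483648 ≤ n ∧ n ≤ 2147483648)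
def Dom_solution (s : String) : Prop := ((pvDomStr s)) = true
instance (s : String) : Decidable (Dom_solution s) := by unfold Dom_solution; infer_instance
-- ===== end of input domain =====

-- B is an alternative algorithm (repeated first-adjacent-pair deletion instead of A's
-- one-pass stack); equivalence of RETURN values is proved on all strings.

-- ===== PORT A =====
-- one step of A's loop body: answer[-1] == alpha ? answer.pop() : answer.append(alpha)
def solStepA (ans : List String) (c : Char) : List String :=
  if PySem.List.pyGet? ans (-1) = some (String.ofList [c]) then ans.dropLast else ans ++ [String.ofList [c]]

def solution (s : String) : Int :=
  let answer := s.toList.foldl solStepA [""]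
  if answer.length = 1 then 1 else 0

-- ===== PORT B =====
-- the inner for-loop of Source B: first index i with s[i]==s[i+1]; returns s[:i]+s[i+2:] if found
def removeFirst : List Char → Option (List Char)
  | [] => none
  | [_] => none
  | a :: b :: t => if a = b then some t else (removeFirst (b :: t)).map (a :: ·)

theorem removeFirst_length {l t : List Char} (h : removeFirst l = some t) :
    t.length < l.length := by
  induction l generalizing t with
  | nil => simp [removeFirst] at h
  | cons a rest ih =>
    match rest, h with
    | [], h => simp [removeFirst] at h
    | b :: t', h =>
      by_cases hab : a = b
      · simp [removeFirst, hab] at h; subst h; simp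
      · simp [removeFirst, hab] at h
        obtain ⟨u, hu, rfl⟩ := h
        have := ih hu; simp at this ⊢; omega

def reduceLoop (l : List Char) : List Char :=
  match _h : removeFirst l with
  | some t => reduceLoop t
  | none => l
termination_by l.length
decreasing_by exact removeFirst_length _h

def solution_alt (s : String) : Int :=
  if reduceLoop s.toList = [] then 1 else 0

-- ===== PRECONDITION & SPEC =====
def Spec_solution (s : String) (out : Int) : Prop := out = solution_alt s
instance (s : String) (out : Int) : Decidable (Spec_solution s out) := by unfold Spec_solution; infer_instance

-- ===== CLAIM (what is proved, stated in full; the proofs are below) =====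
def Claim_equal_solution : Prop := ∀ (s : String), Dom_solution s → Spec_solution s (solution s)

-- ===== LEMMAS AND PROOFS =====

-- abstract char stack (head = top) underlying A's answer list
def stepS (S : List Char) (c : Char) : List Char :=
  if S.head? = some c then S.tail else c :: S

def redS (S : List Char) (l : List Char) : List Char := l.foldl stepS S

theorem chain_stepS {S : List Char} (h : List.IsChain (· ≠ ·) S) (c : Char) :
    List.IsChain (· ≠ ·) (stepS S c) := by
  unfold stepS
  split
  · exact h.tail
  · next hne =>
    cases S with
    | nil => exact List.isChain_singleton c
    | cons a t =>
      refine List.isChain_cons_cons.mpr ⟨?_, h⟩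
      simp at hne; exact fun e => hne e.symm

theorem stepS_stepS {S : List Char} (h : List.IsChain (· ≠ ·) S) (c : Char) :
    stepS (stepS S c) c = S := by
  by_cases htop : S.head? = some c
  · cases S with
    | nil => simp at htop
    | cons a t =>
      simp at htop; subst htop
      rw [show stepS (a :: t) a = t by simp [stepS]]
      cases t with
      | nil => simp [stepS]
      | cons b u =>
        have hab : a ≠ b := (List.isChain_cons_cons.mp h).1
        have hba : ¬ (b = a) := fun e => hab e.symm
        simp [stepS, hba]
  · simp [stepS, htop]

-- removing the first adjacent equal pair does not change the stack result
theorem redS_removeFirst {l t : List Char} (h : removeFirst l = some t)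
    {S : List Char} (hS : List.IsChain (· ≠ ·) S) : redS S l = redS S t := by
  induction l generalizing t S with
  | nil => simp [removeFirst] at h
  | cons a rest ih =>
    match rest, h with
    | [], h => simp [removeFirst] at h
    | b :: t', h =>
      by_cases hab : a = b
      · subst hab
        simp [removeFirst] at h
        rw [← h]
        show redS (stepS (stepS S a) a) t' = redS S t'
        rw [stepS_stepS hS]
      · simp [removeFirst, hab] at h
        obtain ⟨u, hu, rfl⟩ := h
        show redS (stepS S a) (b :: t') = redS (stepS S a) u
        exact ih hu (chain_stepS hS a)

theorem redS_reduceLoop (l : List Char) : redS [] l = redS [] (reduceLoop l) := by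
  rw [reduceLoop]
  split
  · rename_i t h
    rw [redS_removeFirst h List.isChain_nil]
    exact redS_reduceLoop t
  · rfl
termination_by l.length
decreasing_by exact removeFirst_length ‹_›

theorem removeFirst_none_chain {l : List Char} (h : removeFirst l = none) :
    List.IsChain (· ≠ ·) l := by
  induction l with
  | nil => exact List.isChain_nil
  | cons a rest ih =>
    match rest, h with
    | [], _ => exact List.isChain_singleton a
    | b :: t, h =>
      by_cases hab : a = b
      · simp [removeFirst, hab] at h
      · simp [removeFirst, hab] at h
        exact List.isChain_cons_cons.mpr ⟨hab, ih h⟩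

theorem removeFirst_reduceLoop (l : List Char) : removeFirst (reduceLoop l) = none := by
  rw [reduceLoop]
  split
  · next t _ => exact removeFirst_reduceLoop t
  · assumption
termination_by l.length
decreasing_by exact removeFirst_length ‹_›

-- on a pair-free word the stack just accumulates in reverse
theorem redS_chain (l : List Char) (hl : List.IsChain (· ≠ ·) l) (S : List Char)
    (hfst : ∀ c, l.head? = some c → S.head? ≠ some c) :
    redS S l = l.reverse ++ S := by
  induction l generalizing S with
  | nil => rfl
  | cons c t ih =>
    have hpush : stepS S c = c :: S := by
      unfold stepS; rw [if_neg (hfst c (by simp))]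
    show redS (stepS S c) t = _
    rw [hpush, ih (List.isChain_cons.mp hl).2]
    · simp
    · intro d hd
      simp only [List.head?_cons, ne_eq, Option.some.injEq]
      intro e
      exact (List.isChain_cons.mp hl).1 d hd e

theorem redS_empty_iff (l : List Char) : redS [] l = [] ↔ reduceLoop l = [] := by
  rw [redS_reduceLoop l]
  have hch := removeFirst_none_chain (removeFirst_reduceLoop l)
  rw [redS_chain _ hch [] (by simp)]
  simp

-- A's string stack is "" :: (char stack reversed, as one-char strings)
theorem foldl_solStepA (l : List Char) (S : List Char) (hS : List.IsChain (· ≠ ·) S) :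
    List.foldl solStepA ("" :: (S.reverse.map (fun c => String.ofList [c]))) l
      = "" :: ((redS S l).reverse.map (fun c => String.ofList [c])) := by
  induction l generalizing S with
  | nil => rfl
  | cons c t ih =>
    have hstep : solStepA ("" :: (S.reverse.map (fun c => String.ofList [c]))) c
        = "" :: ((stepS S c).reverse.map (fun c => String.ofList [c])) := by
      unfold solStepA stepS
      by_cases htop : S.head? = some c
      · cases S with
        | nil => simp at htop
        | cons a u =>
          simp at htop; subst htop
          rw [if_pos, if_pos (by simp)]
          · rw [show ("" :: ((a :: u).reverse.map (fun c => String.ofList [c])))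
                = ("" :: (u.reverse.map (fun c => String.ofList [c]))) ++ [String.ofList [a]] by simp]
            rw [List.dropLast_concat]
            simp
          · rw [show ("" :: ((a :: u).reverse.map (fun c => String.ofList [c])))
                = ("" :: (u.reverse.map (fun c => String.ofList [c]))) ++ [String.ofList [a]] by simp]
            rw [PySem.List.pyGet?_neg_one_append_singleton]
      · rw [if_neg, if_neg htop]
        · simp
        · cases S with
          | nil =>
            rw [show ("" :: (([] : List Char).reverse.map (fun c => String.ofList [c]))) = [""] by simp]
            rw [show PySem.List.pyGet? [""] (-1) = some "" from rfl]
            simp only [Option.some.injEq]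
            intro h
            have := congrArg String.toList h
            simp at this
          | cons a u =>
            rw [show ("" :: ((a :: u).reverse.map (fun c => String.ofList [c])))
                = ("" :: (u.reverse.map (fun c => String.ofList [c]))) ++ [String.ofList [a]] by simp]
            rw [PySem.List.pyGet?_neg_one_append_singleton]
            simp only [Option.some.injEq]
            intro h
            have hac : a = c := by
              have := congrArg String.toList h; simpa using this
            exact htop (by simp [hac])
    rw [List.foldl_cons, hstep]
    exact ih (stepS S c) (chain_stepS hS c)

-- ===== VERDICT (by name: the statement is the Claim_ definition above) =====
theorem solution_spec : Claim_equal_solution := by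
  intro s _
  show solution s = solution_alt s
  unfold solution solution_alt
  have h := foldl_solStepA s.toList [] List.isChain_nil
  simp only [List.reverse_nil, List.map_nil] at h
  rw [h]
  by_cases he : reduceLoop s.toList = []
  · have h2 : redS [] s.toList = [] := (redS_empty_iff s.toList).mpr he
    simp [h2, he]
  · have h2 : redS [] s.toList ≠ [] := fun h' => he ((redS_empty_iff s.toList).mp h')
    simp [h2, he]
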